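-- pv_equiv track=rewrite | github.com/Danilado/IU7-semester1 | labs/lab11/main.py | simple_choise_sort
-- ===== SOURCE A (Python) =====
-- from typing import List, Union
--
-- def find_min_index(arr: List) -> int:
--     """Возвращает индекс минимального элемента
--
--     :param arr: Список
--     :type arr: List
--     :return: Индекс минимального элемента
--     :rtype: int
--     """
--     min_el = arr[0]
--     min_index = 0
--
--     for i in range(1, len(arr)):
--         if arr[i] < min_el:
--             min_index = i
--             min_el = arr[i]
--
--     return min_index
--
-- def simple_choise_sort(arr: List) -> Union[List, int]:
--     """Сортирует список методом простого выбора
--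
--     :param arr: Список для сортировки
--     :type arr: List
--     :return: Список и количество перестановок
--     :rtype: Union[List, int]
--     """
--     swaps = 0
--
--     for i in range(len(arr) - 1):
--         min_index = find_min_index(arr[i::]) + i
--         if min_index != i:
--             arr[min_index], arr[i] = arr[i], arr[min_index]
--             swaps += 1
--
--     return arr, swaps
-- ===== SOURCE B (Python) =====
-- def simple_choise_sort(arr):
--     # Note: unlike the original, this does not mutate arr in place;
--     # the returned value is identical.
--     rest = list(arr)
--     res = []
--     swaps = 0
--     while len(rest) > 1:
--         j = rest.index(min(rest))
--         if j == 0: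
--             res.append(rest[0])
--             rest = rest[1:]
--         else:
--             res.append(rest[j])
--             tail = rest[1:]
--             tail[j - 1] = rest[0]
--             rest = tail
--             swaps += 1
--     res.extend(rest)
--     return res, swaps
-- ===== Notes on version B (the rewrite author's own statement) =====
-- stated objective: alternative
-- what changed: A runs an index loop over the full array, re-finding the argmin of each slice with a manual running-min fold and swapping elements in place by index; B instead repeatedly extracts the leftmost minimum (via min + list.index) from a shrinking rest list and builds the sorted output front-to-back, counting an extraction as a swap whenever the minimum is not already in front.
import Mathlib
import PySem

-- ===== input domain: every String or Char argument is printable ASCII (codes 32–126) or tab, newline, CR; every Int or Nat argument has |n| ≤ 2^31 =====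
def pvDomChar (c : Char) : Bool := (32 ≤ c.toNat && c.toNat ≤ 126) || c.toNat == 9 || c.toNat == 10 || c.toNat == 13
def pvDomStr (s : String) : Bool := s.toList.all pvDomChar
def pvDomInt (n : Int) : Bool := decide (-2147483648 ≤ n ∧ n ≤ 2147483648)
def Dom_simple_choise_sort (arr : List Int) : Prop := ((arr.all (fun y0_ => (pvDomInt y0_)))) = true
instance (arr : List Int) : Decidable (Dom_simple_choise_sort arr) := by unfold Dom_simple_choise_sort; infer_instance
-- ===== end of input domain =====

-- B replaces A's index-driven in-place selection loop by a functional pass that repeatedly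
-- extracts the leftmost minimum (min + index) from a shrinking rest list and builds the output
-- front-to-back (objective: alternative). A mutates its argument in place, B does not; the
-- equivalence proved here is about the RETURN value only.

-- ===== PORT A =====
-- Python's `arr[0]` raises IndexError on []; simple_choise_sort only calls this on nonempty
-- slices, so the [] branch (returning 0) is never reached from simple_choise_sort.
-- `arr[i]` for i ∈ range(1, len(arr)) never raises, so pyGetD is exact here.
def find_min_index (arr : List Int) : Int :=
  match arr with
  | [] => 0
  | x :: t =>
    ((PySem.List.pyRange 1 (((x :: t).length : Int)) 1).foldl
      (fun (s : Int × Int) i =>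
        if PySem.List.pyGetD (x :: t) i 0 < s.1 then (PySem.List.pyGetD (x :: t) i 0, i) else s)
      (x, 0)).2

-- the loop body of A (indices i/min_index stay in range, so pySetD/pyGetD are exact)
def scsStep (s : List Int × Int) (i : Int) : List Int × Int :=
  let a := s.1
  let min_index := find_min_index (PySem.List.slice a (some i) none) + i
  if min_index ≠ i then
    (PySem.List.pySetD (PySem.List.pySetD a min_index (PySem.List.pyGetD a i 0)) i
       (PySem.List.pyGetD a min_index 0), s.2 + 1)
  else (a, s.2)

def simple_choise_sort (arr : List Int) : List Int × Int :=
  (PySem.List.pyRange 0 ((arr.length : Int) - 1) 1).foldl scsStep (arr, 0)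

-- ===== PORT B =====
-- the while loop of Source B: rest/res/swaps are the loop state
def sortLoop (rest res : List Int) (swaps : Int) : List Int × Int :=
  if 1 < rest.length then
    let m := (PySem.List.min? rest (fun y => y)).getD 0
    let j := (PySem.List.index? rest m).getD 0
    if j = 0 then
      sortLoop rest.tail (res ++ [rest.headD 0]) swaps
    else
      sortLoop (rest.tail.set (j - 1) (rest.headD 0))
        (res ++ [PySem.List.pyGetD rest (j : Int) 0]) (swaps + 1)
  else (res ++ rest, swaps)
termination_by rest.length
decreasing_by
  · simp only [List.length_tail]; omega
  · simp only [List.length_set, List.length_tail]; omega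

def simple_choise_sort_alt (arr : List Int) : List Int × Int :=
  sortLoop arr [] 0

-- ===== PRECONDITION & SPEC =====
def Spec_simple_choise_sort (arr : List Int) (out : List Int × Int) : Prop := out = simple_choise_sort_alt arr
instance (arr : List Int) (out : List Int × Int) : Decidable (Spec_simple_choise_sort arr out) := by unfold Spec_simple_choise_sort; infer_instance

-- ===== CLAIM (what is proved, stated in full; the proofs are below) =====
def Claim_equal_simple_choise_sort : Prop := ∀ (arr : List Int), Dom_simple_choise_sort arr → Spec_simple_choise_sort arr (simple_choise_sort arr)

-- ===== LEMMAS AND PROOFS =====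

-- the running minimum of A's helper is bounded above by every element seen so far
lemma foldl_min_le (x : Int) (l : List Int) : ∀ y ∈ x :: l, l.foldl min x ≤ y := by
  induction l generalizing x with
  | nil => intro y hy; simp at hy; simp [hy]
  | cons a l ih =>
    intro y hy
    simp only [List.mem_cons] at hy
    rcases hy with h1 | h1 | h1
    · rw [h1]; exact le_trans (ih (min x a) (min x a) (by simp)) (min_le_left _ _)
    · rw [h1]; exact le_trans (ih (min x a) (min x a) (by simp)) (min_le_right _ _)
    · exact ih (min x a) y (by simp [h1])

lemma foldl_min_mem (x : Int) (l : List Int) : l.foldl min x ∈ x :: l := by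
  have h := PySem.List.min?_id_cons x l
  exact PySem.List.min?_mem h

-- invariant of the argmin fold inside find_min_index, over the first k+1 elements
lemma fmi_fold (x : Int) (t : List Int) : ∀ k : Nat, k ≤ t.length →
    (PySem.List.pyRange 1 ((k : Int) + 1) 1).foldl
      (fun (s : Int × Int) i =>
        if PySem.List.pyGetD (x :: t) i 0 < s.1 then (PySem.List.pyGetD (x :: t) i 0, i) else s)
      (x, 0)
    = ((t.take k).foldl min x,
       (((PySem.List.index? ((x :: t).take (k + 1)) ((t.take k).foldl min x)).getD 0 : Nat) : Int)) := by
  intro k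
  induction k with
  | zero =>
    intro _
    rw [PySem.List.pyRange_one_eq_nil (by norm_num)]
    simp
  | succ k ih =>
    intro hk
    have hk' : k ≤ t.length := by omega
    have hrng : PySem.List.pyRange 1 (((k+1 : Nat) : Int) + 1) 1
        = PySem.List.pyRange 1 ((k : Int) + 1) 1 ++ [(k : Int) + 1] := by
      push_cast
      exact PySem.List.pyRange_one_succ_right (by omega)
    rw [hrng, List.foldl_append, ih hk']
    have hkt : k < t.length := by omega
    have hget : PySem.List.pyGetD (x :: t) ((k : Int) + 1) 0 = t[k] := by
      have : ((k : Int) + 1) = ((k + 1 : Nat) : Int) := by push_cast; ring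
      rw [this, PySem.List.pyGetD_natCast]
      simp [List.getD_eq_getElem?_getD, hkt]
    set M := (t.take k).foldl min x with hM
    have htake : t.take (k+1) = t.take k ++ [t[k]] := by
      rw [List.take_add_one]
      simp [hkt]
    have hMfold : (t.take (k+1)).foldl min x = min M t[k] := by
      rw [htake, List.foldl_append]; rfl
    have hxt_take : (x :: t).take (k+1) = x :: t.take k := List.take_succ_cons
    have hxt_take2 : (x :: t).take (k+2) = (x :: t).take (k+1) ++ [t[k]] := by
      rw [hxt_take, List.take_succ_cons, htake]
      simp
    simp only [List.foldl]
    rw [hget]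
    by_cases hlt : t[k] < M
    · rw [if_pos hlt]
      have hmin : min M t[k] = t[k] := by omega
      have hnotmem : t[k] ∉ (x :: t).take (k+1) := by
        intro hmem
        have := foldl_min_le x (t.take k) t[k] (by rwa [hxt_take] at hmem)
        omega
      have hidx : PySem.List.index? ((x :: t).take (k+2)) t[k] = some ((x :: t).take (k+1)).length := by
        rw [hxt_take2]
        exact PySem.List.index?_append_singleton_self _ _ hnotmem
      have hlen : ((x :: t).take (k+1)).length = k + 1 := by
        simp [hxt_take]
        omega
      rw [hMfold, hmin, hidx, hlen]
      simp
    · rw [if_neg hlt]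
      have hmin : min M t[k] = M := by omega
      have hmem : M ∈ (x :: t).take (k+1) := by
        rw [hxt_take]; exact foldl_min_mem x (t.take k)
      have hidx : PySem.List.index? ((x :: t).take (k+2)) M
          = PySem.List.index? ((x :: t).take (k+1)) M := by
        rw [hxt_take2]
        exact PySem.List.index?_append_of_mem _ hmem
      rw [hMfold, hmin, hidx]
-- find_min_index computes the index of the first occurrence of the minimum
lemma fmi_eq (x : Int) (t : List Int) :
    find_min_index (x :: t)
      = (((PySem.List.index? (x :: t) (t.foldl min x)).getD 0 : Nat) : Int) := by
  have hcast : (((x :: t).length : Int)) = ((t.length : Int) + 1) := by simp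
  have h := fmi_fold x t t.length le_rfl
  simp only [find_min_index]
  rw [hcast, h]
  simp [List.take_of_length_le]

-- A's loop, run on p ++ r from index p.length, equals B's loop with rest = r, res = p
lemma loop_eq : ∀ (n : Nat) (r p : List Int) (s : Int), r.length = n →
    (PySem.List.pyRange (p.length : Int) ((p.length : Int) + (r.length : Int) - 1) 1).foldl
      scsStep (p ++ r, s)
    = sortLoop r p s := by
  intro n
  induction n using Nat.strong_induction_on with
  | _ n ih =>
    intro r p s hlen
    by_cases hsmall : r.length ≤ 1
    · rw [PySem.List.pyRange_one_eq_nil (by omega), sortLoop, if_neg (by omega)]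
      simp
    · obtain ⟨x, t, rfl⟩ : ∃ x t, r = x :: t := by
        cases r with
        | nil => simp at hsmall
        | cons a b => exact ⟨a, b, rfl⟩
      have hlen2 : 2 ≤ (x :: t).length := by omega
      have hminsome := PySem.List.min?_id_cons x t
      set m := t.foldl min x with hm
      have hmem : m ∈ x :: t := PySem.List.min?_mem hminsome
      obtain ⟨j, hidx⟩ : ∃ j, PySem.List.index? (x :: t) m = some j := by
        have := (PySem.List.index?_isSome_iff (x :: t) m).mpr hmem
        exact Option.isSome_iff_exists.mp this
      obtain ⟨hj, hget, hbef⟩ := PySem.List.getElem_of_index?_eq_some hidx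
      rw [PySem.List.pyRange_one_cons (by simp at hlen2 ⊢; omega), List.foldl_cons]
      have hslice : PySem.List.slice (p ++ x :: t) (some ((p.length : Int))) none = x :: t := by
        rw [PySem.List.slice_from_natCast, List.drop_left]
      have hfmi : find_min_index (x :: t) = ((j : Nat) : Int) := by
        rw [fmi_eq, ← hm, hidx]; rfl
      rw [sortLoop, if_pos (by omega)]
      simp only [hminsome, Option.getD_some, hidx]
      by_cases hj0 : j = 0
      · -- minimum already in front: no swap
        have hstep : scsStep (p ++ x :: t, s) ((p.length : Int)) = (p ++ x :: t, s) := by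
          simp only [scsStep, hslice, hfmi, hj0]
          norm_num
        rw [hstep, if_pos (by simp [hj0])]
        have hre : p ++ x :: t = (p ++ [x]) ++ t := by simp
        have hrng : PySem.List.pyRange ((p.length : Int) + 1)
              ((p.length : Int) + ((x :: t).length : Int) - 1) 1
            = PySem.List.pyRange (((p ++ [x]).length : Int))
              (((p ++ [x]).length : Int) + (t.length : Int) - 1) 1 := by
          congr 1
          · simp
          · simp; ring
        rw [hre, hrng, ih t.length (by have h2 := hlen; simp at h2; omega) t (p ++ [x]) s rfl]
        simp
      · -- swap the leftmost minimum to the front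
        obtain ⟨jj, rfl⟩ : ∃ jj, j = jj + 1 := ⟨j - 1, by omega⟩
        have hgx : PySem.List.pyGetD (p ++ x :: t) ((p.length : Int)) 0 = x := by
          show (PySem.List.pyGet? (p ++ x :: t) ((p.length : Int))).getD 0 = x
          rw [PySem.List.pyGet?_append_length]; rfl
        have hgm : PySem.List.pyGetD (p ++ x :: t) (((jj + 1 : Nat) : Int) + (p.length : Int)) 0 = m := by
          show (PySem.List.pyGet? (p ++ x :: t) (((jj + 1 : Nat) : Int) + (p.length : Int))).getD 0 = m
          rw [add_comm, PySem.List.pyGet?_append_right]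
          simp [List.getElem?_eq_getElem hj, hget]
        have hset1 : PySem.List.pySetD (p ++ x :: t) (((jj + 1 : Nat) : Int) + (p.length : Int)) x
            = p ++ x :: t.set jj x := by
          have hc : (((jj + 1 : Nat) : Int) + (p.length : Int)) = ((p.length + (jj + 1) : Nat) : Int) := by
            push_cast; ring
          rw [hc, PySem.List.pySetD_natCast, List.set_append, if_neg (by omega)]
          have : p.length + (jj + 1) - p.length = jj + 1 := by omega
          rw [this, List.set_cons_succ]
        have hset2 : PySem.List.pySetD (p ++ x :: t.set jj x) ((p.length : Int)) m
            = p ++ m :: t.set jj x := by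
          rw [PySem.List.pySetD_natCast, List.set_append, if_neg (by omega)]
          simp
        have hstep : scsStep (p ++ x :: t, s) ((p.length : Int))
            = ((p ++ [m]) ++ t.set jj x, s + 1) := by
          simp only [scsStep, hslice, hfmi]
          rw [if_pos (by push_cast; omega)]
          rw [hgx, hset1, hgm, hset2]
          simp
        rw [hstep, if_neg (by omega)]
        have hgj : PySem.List.pyGetD (x :: t) (((jj + 1 : Nat) : Int)) 0 = m := by
          show (PySem.List.pyGet? (x :: t) (((jj + 1 : Nat) : Int))).getD 0 = m
          rw [PySem.List.pyGet?_natCast]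
          simp [List.getElem?_eq_getElem hj, hget]
        have hrng : PySem.List.pyRange ((p.length : Int) + 1)
              ((p.length : Int) + ((x :: t).length : Int) - 1) 1
            = PySem.List.pyRange (((p ++ [m]).length : Int))
              (((p ++ [m]).length : Int) + ((t.set jj x).length : Int) - 1) 1 := by
          congr 1
          · simp
          · simp; ring
        rw [hrng, ih (t.set jj x).length (by have h2 := hlen; simp at h2; simp; omega) (t.set jj x) (p ++ [m]) (s + 1) rfl]
        simp only [hgj]
        norm_num

-- ===== VERDICT (by name: the statement is the Claim_ definition above) =====
theorem simple_choise_sort_spec : Claim_equal_simple_choise_sort := by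
  intro arr _
  unfold Spec_simple_choise_sort simple_choise_sort simple_choise_sort_alt
  have h := loop_eq arr.length arr [] 0 rfl
  simpa using h
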